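-- pv_equiv track=rewrite | github.com/mentecatoDev/python | cadenas/04.py | puntua
-- ===== SOURCE A (Python) =====
-- def puntua(cad):
--     """DocString
--     """
--     long = len(cad)
--     primeros = long % 3
--     if primeros > 0:
--         salida = cad[0:primeros]+"."
--     else:
--         salida = ""
--     for i in range(0, (long//3)*3, 3):
--         salida = salida + cad[primeros+i:primeros+i+3] + "."
--     return salida[:-1]
-- ===== SOURCE B (Python) =====
-- def puntua(cad):
--     """DocString
--     """
--     rev = cad[::-1]
--     trozos = [rev[i:i+3] for i in range(0, len(rev), 3)]
--     return ".".join(trozos)[::-1]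
-- ===== Notes on version B (the rewrite author's own statement) =====
-- stated objective: faster
-- what changed: Replaces the remainder-branch plus quadratic string-accumulation loop by reverse the string, chunk the reversal into threes with one comprehension, dot-join the chunks and reverse back, so the leading short group needs no special case and no repeated concatenation occurs.
import Mathlib
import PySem

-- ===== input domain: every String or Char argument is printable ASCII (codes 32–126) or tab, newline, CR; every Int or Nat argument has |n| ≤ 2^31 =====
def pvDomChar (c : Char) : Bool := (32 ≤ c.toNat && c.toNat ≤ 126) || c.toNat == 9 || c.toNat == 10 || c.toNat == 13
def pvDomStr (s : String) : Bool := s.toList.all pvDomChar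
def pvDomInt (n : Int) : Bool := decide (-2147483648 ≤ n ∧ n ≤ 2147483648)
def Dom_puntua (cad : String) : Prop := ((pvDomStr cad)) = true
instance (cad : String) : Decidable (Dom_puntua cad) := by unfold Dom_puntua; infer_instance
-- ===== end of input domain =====

-- B replaces A's remainder branch + quadratic accumulating loop by reverse / chunk-into-threes / join / reverse (measured faster in a timing run).

-- ===== PORT A =====
-- literal transliteration of A on the code-point list (string ops are PySem.Chars over toList)
def puntuaChars (cs : List Char) : List Char :=
  let long : Int := PySem.Chars.len cs
  let primeros : Int := PySem.Int.mod long 3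
  let salida : List Char :=
    if primeros > 0 then PySem.Chars.slice cs (some 0) (some primeros) ++ ['.'] else []
  let salida :=
    (PySem.List.pyRange 0 (PySem.Int.floordiv long 3 * 3) 3).foldl
      (fun s i => s ++ PySem.Chars.slice cs (some (primeros + i)) (some (primeros + i + 3)) ++ ['.'])
      salida
  PySem.Chars.slice salida none (some (-1))

def puntua (cad : String) : String := String.ofList (puntuaChars cad.toList)

-- ===== PORT B =====
-- literal transliteration of Source B: rev = cad[::-1]; chunks of three from the left; '.'-join; reverse back
def puntuaAltChars (cs : List Char) : List Char :=
  let rev : List Char := (PySem.List.slice? cs none none (-1)).getD []  -- cad[::-1]; step -1 never raises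
  let trozos : List (List Char) :=
    (PySem.List.pyRange 0 (PySem.Chars.len rev) 3).map
      (fun i => PySem.List.slice rev (some i) (some (i + 3)))
  (PySem.List.slice? (PySem.Chars.join ['.'] trozos) none none (-1)).getD []

def puntua_alt (cad : String) : String := String.ofList (puntuaAltChars cad.toList)

-- ===== PRECONDITION & SPEC =====
def Spec_puntua (cad : String) (out : String) : Prop := out = puntua_alt cad
instance (cad : String) (out : String) : Decidable (Spec_puntua cad out) := by unfold Spec_puntua; infer_instance

-- ===== CLAIM (what is proved, stated in full; the proofs are below) =====
def Claim_equal_puntua : Prop := ∀ (cad : String), Dom_puntua cad → Spec_puntua cad (puntua cad)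

-- ===== LEMMAS AND PROOFS =====

-- chunks of three, from the left; the last chunk may be shorter
def chunk3 : List (Char) → List (List Char)
  | [] => []
  | [a] => [[a]]
  | [a, b] => [[a, b]]
  | a :: b :: c :: l => [a, b, c] :: chunk3 l

-- A's grouping: the leading remainder chunk (if any), then full chunks of three
def rchunks (cs : List Char) : List (List Char) :=
  if cs.length % 3 = 0 then chunk3 cs
  else cs.take (cs.length % 3) :: chunk3 (cs.drop (cs.length % 3))

lemma chunk3_eq (cs : List Char) (h : cs ≠ []) :
    chunk3 cs = cs.take 3 :: chunk3 (cs.drop 3) := by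
  match cs with
  | [] => exact absurd rfl h
  | [a] => rfl
  | [a, b] => rfl
  | a :: b :: c :: l => rfl

-- range(0, m, 3) as a mapped List.range
lemma pyRange_three (m : Nat) :
    PySem.List.pyRange 0 (m : Int) 3 =
      (List.range ((m + 2) / 3)).map (fun k => ((3 * k : Nat) : Int)) := by
  rw [PySem.List.pyRange_of_pos 0 (m : Int) (by norm_num)]
  have hcount : (if (0 : Int) < (m : Int) then (((m : Int) - 0 + 3 - 1) / 3).toNat else 0)
      = (m + 2) / 3 := by
    split_ifs with h <;> omega
  rw [hcount]
  apply List.map_congr_left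
  intro k _
  push_cast
  ring

lemma range_chunk : ∀ (n : Nat) (r : List Char), r.length = n →
    (List.range ((n + 2) / 3)).map (fun k => ((r.drop (3 * k)).take 3)) = chunk3 r := by
  intro n
  induction n using Nat.strong_induction_on with
  | _ n ih =>
    intro r hr
    cases r with
    | nil =>
      simp at hr
      subst hr
      simp [chunk3]
    | cons a l =>
      have hr' : l.length + 1 = n := by simpa using hr
      have h1 : (n + 2) / 3 = (n - 3 + 2) / 3 + 1 := by omega
      rw [h1, List.range_succ_eq_map, List.map_cons, List.map_map]
      rw [chunk3_eq (a :: l) (by simp)]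
      congr 1
      have hdl : ((a :: l).drop 3).length = n - 3 := by
        simp only [List.length_drop, List.length_cons]; omega
      rw [← ih (n - 3) (by omega) ((a :: l).drop 3) hdl]
      apply List.map_congr_left
      intro k _
      show List.take 3 (List.drop (3 * Nat.succ k) (a :: l))
          = List.take 3 (List.drop (3 * k) ((a :: l).drop 3))
      rw [List.drop_drop, (by omega : 3 * Nat.succ k = 3 + 3 * k)]

-- the '.'-terminated flattening whose dropLast is the join
lemma dropLast_flatten : ∀ (xs : List (List Char)),
    ((xs.map (· ++ ['.'])).flatten).dropLast = PySem.Chars.join ['.'] xs := by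
  intro xs
  induction xs with
  | nil => simp [PySem.Chars.join_nil]
  | cons a t ih =>
    cases t with
    | nil => simp [PySem.Chars.join_singleton]
    | cons b t' =>
      rw [PySem.Chars.join_cons_cons, ← ih]
      simp only [List.map_cons, List.flatten_cons]
      rw [List.dropLast_append_of_ne_nil (by simp), List.append_assoc]

-- join distributes over a reversal of reversed chunks
lemma join_concat (ys : List (List Char)) (z : List Char) (h : ys ≠ []) :
    PySem.Chars.join ['.'] (ys ++ [z]) = PySem.Chars.join ['.'] ys ++ ['.'] ++ z := by
  induction ys with
  | nil => exact absurd rfl h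
  | cons a t ih =>
    cases t with
    | nil => simp [PySem.Chars.join_cons_cons, PySem.Chars.join_singleton]
    | cons b t' =>
      have ih' := ih (by simp)
      simp only [List.cons_append] at ih' ⊢
      rw [PySem.Chars.join_cons_cons, ih', PySem.Chars.join_cons_cons]
      simp [List.append_assoc]

lemma join_reverse : ∀ (xs : List (List Char)),
    (PySem.Chars.join ['.'] xs).reverse =
      PySem.Chars.join ['.'] ((xs.map List.reverse).reverse) := by
  intro xs
  induction xs with
  | nil => simp [PySem.Chars.join_nil]
  | cons a t ih =>
    cases t with
    | nil => simp [PySem.Chars.join_singleton]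
    | cons b t' =>
      have hmap : ((a :: b :: t').map List.reverse).reverse
          = ((b :: t').map List.reverse).reverse ++ [a.reverse] := by simp
      rw [PySem.Chars.join_cons_cons, hmap, join_concat _ _ (by simp), ← ih]
      simp [List.reverse_append, List.append_assoc]

lemma chunk3_append_three : ∀ (n : Nat) (x t : List Char), x.length = n →
    x.length % 3 = 0 → t.length = 3 → chunk3 (x ++ t) = chunk3 x ++ [t] := by
  intro n
  induction n using Nat.strong_induction_on with
  | _ n ih =>
    intro x t hn hx ht
    cases x with
    | nil =>
      rw [List.nil_append, chunk3_eq t (by intro h; rw [h] at ht; simp at ht)]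
      rw [List.take_of_length_le (by omega), List.drop_eq_nil_of_le (by omega)]
      simp [chunk3]
    | cons a l =>
      have hL : l.length + 1 = n := by simpa using hn
      have hx' : (l.length + 1) % 3 = 0 := by simpa using hx
      have h3 : 3 ≤ l.length + 1 := by omega
      have hta : (3 : Nat) ≤ (a :: l).length := by simp only [List.length_cons]; omega
      have hdl : ((a :: l).drop 3).length = n - 3 := by
        simp only [List.length_drop, List.length_cons]; omega
      have hdm : ((a :: l).drop 3).length % 3 = 0 := by
        simp only [List.length_drop, List.length_cons]; omega
      rw [chunk3_eq ((a :: l) ++ t) (by simp), chunk3_eq (a :: l) (by simp),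
        List.take_append_of_le_length hta, List.drop_append_of_le_length hta,
        List.cons_append]
      congr 1
      exact ih (n - 3) (by omega) ((a :: l).drop 3) t hdl hdm ht

lemma rchunks_append_three (m t : List Char) (ht : t.length = 3) :
    rchunks (m ++ t) = rchunks m ++ [t] := by
  have hmod : (m ++ t).length % 3 = m.length % 3 := by simp [ht]
  unfold rchunks
  rw [hmod]
  by_cases h0 : m.length % 3 = 0
  · rw [if_pos h0, if_pos h0]
    exact chunk3_append_three m.length m t rfl h0 ht
  · rw [if_neg h0, if_neg h0]
    rw [List.take_append_of_le_length (Nat.mod_le _ _),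
      List.drop_append_of_le_length (Nat.mod_le _ _), List.cons_append]
    congr 1
    exact chunk3_append_three _ (m.drop (m.length % 3)) t rfl (by simp; omega) ht

lemma rchunks_small (r : List Char) (h1 : r ≠ []) (h2 : r.length < 3) :
    rchunks r = [r] := by
  have hl : 0 < r.length := r.length_pos_of_ne_nil h1
  unfold rchunks
  rw [if_neg (by omega)]
  rw [Nat.mod_eq_of_lt h2]
  simp [List.take_of_length_le (le_refl _), List.drop_eq_nil_of_le (le_refl _), chunk3]

lemma chunk3_reverse : ∀ (n : Nat) (r : List Char), r.length = n →
    ((chunk3 r).map List.reverse).reverse = rchunks r.reverse := by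
  intro n
  induction n using Nat.strong_induction_on with
  | _ n ih =>
    intro r hn
    cases r with
    | nil => simp [chunk3, rchunks]
    | cons a l =>
      rw [chunk3_eq (a :: l) (by simp)]
      simp only [List.map_cons, List.reverse_cons]
      rw [ih (n - 3) (by simp at hn; omega) ((a :: l).drop 3) (by simp at hn ⊢; omega)]
      by_cases h3 : (a :: l).length ≥ 3
      · have h3' : 3 ≤ l.length + 1 := by simpa using h3
        have hsplit : l.reverse ++ [a] = ((a :: l).drop 3).reverse ++ ((a :: l).take 3).reverse := by
          rw [← List.reverse_append, List.take_append_drop, List.reverse_cons]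
        rw [hsplit, rchunks_append_three _ _ (by simp only [List.length_reverse, List.length_take, List.length_cons]; omega)]
      · have h3' : l.length + 1 < 3 := by simp at h3; omega
        have hdrop : (a :: l).drop 3 = [] := List.drop_eq_nil_of_le (by simp only [List.length_cons]; omega)
        have htake : (a :: l).take 3 = a :: l := List.take_of_length_le (by simp only [List.length_cons]; omega)
        rw [hdrop, htake, ← List.reverse_cons,
          rchunks_small ((a :: l).reverse) (by simp) (by simp only [List.length_reverse, List.length_cons]; omega)]
        simp [rchunks, chunk3]

-- ===== normal forms of the two ports =====

lemma A_norm (cs : List Char) :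
    puntuaChars cs = PySem.Chars.join ['.'] (rchunks cs) := by
  have hmod : PySem.Int.mod ((cs.length : Int)) 3 = ((cs.length % 3 : Nat) : Int) := by
    exact_mod_cast PySem.Int.mod_natCast cs.length 3
  have hdiv : PySem.Int.floordiv ((cs.length : Int)) 3 * 3 = ((cs.length / 3 * 3 : Nat) : Int) := by
    rw [(by exact_mod_cast PySem.Int.floordiv_natCast cs.length 3 :
      PySem.Int.floordiv ((cs.length : Int)) 3 = ((cs.length / 3 : Nat) : Int))]
    push_cast
    ring
  unfold puntuaChars
  simp only [PySem.Chars.len_eq, hmod, hdiv, PySem.Chars.slice_eq_listSlice, pyRange_three,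
    List.map_map, PySem.List.slice_to_neg_one, List.append_assoc,
    PySem.List.foldl_append_eq_flatMap, List.flatMap_def]
  rw [← dropLast_flatten]
  congr 1
  have hcc : (cs.length / 3 * 3 + 2) / 3 = ((cs.length - cs.length % 3) + 2) / 3 := by omega
  have hmap : (List.map
        ((fun x => PySem.List.slice cs (some ((cs.length % 3 : Nat) + x))
            (some (((cs.length % 3 : Nat) : Int) + x + 3)) ++ ['.']) ∘ fun k => ((3 * k : Nat) : Int))
        (List.range ((cs.length / 3 * 3 + 2) / 3)))
      = List.map (fun x => x ++ ['.']) (chunk3 (cs.drop (cs.length % 3))) := by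
    rw [hcc, ← range_chunk (cs.length - cs.length % 3) (cs.drop (cs.length % 3)) (by simp),
      List.map_map]
    apply List.map_congr_left
    intro k _
    show PySem.List.slice cs (some (((cs.length % 3 : Nat) : Int) + ((3 * k : Nat) : Int)))
          (some (((cs.length % 3 : Nat) : Int) + ((3 * k : Nat) : Int) + 3)) ++ ['.']
        = ((cs.drop (cs.length % 3)).drop (3 * k)).take 3 ++ ['.']
    congr 1
    rw [(by push_cast; ring : ((cs.length % 3 : Nat) : Int) + ((3 * k : Nat) : Int)
          = ((cs.length % 3 + 3 * k : Nat) : Int)),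
      (by push_cast; ring : ((cs.length % 3 + 3 * k : Nat) : Int) + 3
          = ((cs.length % 3 + 3 * k + 3 : Nat) : Int)),
      PySem.List.slice_natCast, List.drop_drop]
    congr 1
    omega
  rw [hmap]
  by_cases hp : cs.length % 3 = 0
  · simp [rchunks, hp]
  · have hpos : (0 : Int) < ((cs.length % 3 : Nat) : Int) := by
      exact_mod_cast Nat.pos_of_ne_zero hp
    rw [if_pos hpos, PySem.List.slice_zero_start, PySem.List.slice_to_natCast]
    unfold rchunks
    rw [if_neg hp]
    simp [List.append_assoc]

lemma B_norm (cs : List Char) :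
    puntuaAltChars cs = (PySem.Chars.join ['.'] (chunk3 cs.reverse)).reverse := by
  unfold puntuaAltChars
  simp only [PySem.List.slice?_none_none_neg_one, Option.getD_some, PySem.Chars.len_eq,
    pyRange_three, List.map_map]
  congr 2
  rw [← range_chunk cs.reverse.length cs.reverse rfl]
  apply List.map_congr_left
  intro k _
  show PySem.List.slice cs.reverse (some ((3 * k : Nat) : Int)) (some (((3 * k : Nat) : Int) + 3))
      = (cs.reverse.drop (3 * k)).take 3
  rw [(by push_cast; ring : ((3 * k : Nat) : Int) + 3 = ((3 * k + 3 : Nat) : Int)),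
    PySem.List.slice_natCast]
  congr 1
  omega

lemma chars_eq (cs : List Char) : puntuaChars cs = puntuaAltChars cs := by
  rw [A_norm, B_norm, join_reverse, chunk3_reverse cs.reverse.length cs.reverse rfl,
    List.reverse_reverse]

-- ===== VERDICT (by name: the statement is the Claim_ definition above) =====
theorem puntua_spec : Claim_equal_puntua := by
  intro cad _
  unfold Spec_puntua puntua puntua_alt
  rw [chars_eq]
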